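-- pv_equiv track=rewrite | github.com/polirritmico/codesignal_solutions | Python/increaseNumberRoundness.py | solution
-- ===== SOURCE A (Python) =====
-- def solution(number):
--     reversed_number_str = str(number)[::-1]
--     prev_zero = True
--     for char in reversed_number_str:
--         if char != '0':
--             prev_zero = False
--         elif not prev_zero:
--             return True
--     return False
-- ===== SOURCE B (Python) =====
-- def solution(number):
--     n = abs(number)
--     while n and n % 10 == 0:
--         n //= 10
--     while n:
--         if n % 10 == 0:
--             return True
--         n //= 10
--     return False
-- ===== Notes on version B (the rewrite author's own statement) =====
-- stated objective: alternative
-- what changed: Replaces A's character scan over the reversed decimal string (with a prev_zero flag) by pure integer arithmetic: divide out the trailing zeros with repeated floor division by ten, then test the remaining digits for a zero via the remainder — no string is ever built.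
import Mathlib
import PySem

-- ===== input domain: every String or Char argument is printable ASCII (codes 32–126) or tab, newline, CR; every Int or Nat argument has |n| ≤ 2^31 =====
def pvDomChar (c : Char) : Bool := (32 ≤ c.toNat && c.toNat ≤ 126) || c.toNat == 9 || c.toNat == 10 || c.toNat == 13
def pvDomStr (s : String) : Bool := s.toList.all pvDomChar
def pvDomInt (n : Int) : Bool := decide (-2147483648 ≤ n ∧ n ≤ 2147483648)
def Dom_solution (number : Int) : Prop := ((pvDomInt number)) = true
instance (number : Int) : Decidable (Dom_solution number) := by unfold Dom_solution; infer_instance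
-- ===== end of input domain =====

-- B replaces A's character scan over the reversed decimal string by pure integer arithmetic
-- (divide out trailing zeros, then test the remaining digits via the remainder); no string is built.

-- ===== PORT A =====
-- A's for-loop with early return, over the reversed decimal string ([::-1] = reverse)
def solLoopA : List Char → Bool → Bool
  | [], _ => false
  | c :: rest, prevZero =>
    if c ≠ '0' then solLoopA rest false
    else if ¬ prevZero then true
    else solLoopA rest prevZero

def solution (number : Int) : Bool :=
  solLoopA ((PySem.Int.toChars number).reverse) true

-- ===== PORT B =====
-- 'while n and n % 10 == 0: n //= 10' — fuel-bounded transcription (fuel = current n; n strictly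
-- decreases each iteration, so fuel n suffices); n is nonnegative (abs), so // and % are Nat div/mod.
def stripBAux : Nat → Nat → Nat
  | 0, n => n
  | f + 1, n => if n ≠ 0 ∧ n % 10 = 0 then stripBAux f (n / 10) else n

-- 'while n: if n % 10 == 0: return True; n //= 10' — same fuel scheme.
def hasZeroBAux : Nat → Nat → Bool
  | 0, _ => false
  | f + 1, n => if n ≠ 0 then (if n % 10 = 0 then true else hasZeroBAux f (n / 10)) else false

def solution_alt (number : Int) : Bool :=
  hasZeroBAux (stripBAux number.natAbs number.natAbs) (stripBAux number.natAbs number.natAbs)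

-- ===== PRECONDITION & SPEC =====
def Spec_solution (number : Int) (out : Bool) : Prop := out = solution_alt number
instance (number : Int) (out : Bool) : Decidable (Spec_solution number out) := by unfold Spec_solution; infer_instance

-- ===== CLAIM (what is proved, stated in full; the proofs are below) =====
def Claim_equal_solution : Prop := ∀ (number : Int), Dom_solution number → Spec_solution number (solution number)

-- ===== LEMMAS AND PROOFS =====

-- fuel irrelevance: any fuel ≥ n computes the same value
theorem stripBAux_congr : ∀ f g n : Nat, n ≤ f → n ≤ g → stripBAux f n = stripBAux g n := by
  intro f
  induction f using Nat.strong_induction_on with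
  | _ f ih =>
    intro g n hf hg
    match f, g with
    | 0, g => interval_cases n; cases g <;> rfl
    | f + 1, 0 => interval_cases n; simp [stripBAux]
    | f + 1, g + 1 =>
      by_cases h : n ≠ 0 ∧ n % 10 = 0
      · have hlt : n / 10 < n := Nat.div_lt_self (Nat.pos_of_ne_zero h.1) (by omega)
        simp only [stripBAux, if_pos h]
        exact ih f (by omega) g (n / 10) (by omega) (by omega)
      · simp [stripBAux, if_neg h]

theorem hasZeroBAux_congr : ∀ f g n : Nat, n ≤ f → n ≤ g → hasZeroBAux f n = hasZeroBAux g n := by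
  intro f
  induction f using Nat.strong_induction_on with
  | _ f ih =>
    intro g n hf hg
    match f, g with
    | 0, g => interval_cases n; cases g <;> rfl
    | f + 1, 0 => interval_cases n; simp [hasZeroBAux]
    | f + 1, g + 1 =>
      by_cases h0 : n = 0
      · simp [hasZeroBAux, h0]
      · by_cases hm : n % 10 = 0
        · simp [hasZeroBAux, h0, hm]
        · have hlt : n / 10 < n := Nat.div_lt_self (Nat.pos_of_ne_zero h0) (by omega)
          simp only [hasZeroBAux, if_neg hm, if_pos h0]
          exact ih f (by omega) g (n / 10) (by omega) (by omega)

-- self-fuel unfolding lemmas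
def stripN (n : Nat) : Nat := stripBAux n n
def hasZeroN (n : Nat) : Bool := hasZeroBAux n n

theorem stripN_eq (n : Nat) :
    stripN n = if n ≠ 0 ∧ n % 10 = 0 then stripN (n / 10) else n := by
  unfold stripN
  match n with
  | 0 => simp [stripBAux]
  | k + 1 =>
    by_cases h : (k + 1 : Nat) ≠ 0 ∧ (k + 1) % 10 = 0
    · have hlt : (k + 1) / 10 < k + 1 := Nat.div_lt_self (by omega) (by omega)
      simp only [stripBAux, if_pos h]
      exact stripBAux_congr k ((k+1)/10) ((k+1)/10) (by omega) (le_refl _)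
    · have hm : ¬((k + 1) % 10 = 0) := fun hh => h ⟨by omega, hh⟩
      simp [stripBAux, hm]

theorem hasZeroN_eq (n : Nat) :
    hasZeroN n = if n ≠ 0 then (if n % 10 = 0 then true else hasZeroN (n / 10)) else false := by
  unfold hasZeroN
  match n with
  | 0 => simp [hasZeroBAux]
  | k + 1 =>
    by_cases hm : (k + 1) % 10 = 0
    · simp [hasZeroBAux, hm]
    · have hlt : (k + 1) / 10 < k + 1 := Nat.div_lt_self (by omega) (by omega)
      simp only [hasZeroBAux, ne_eq, Nat.succ_ne_zero, not_false_eq_true, if_true, if_neg hm]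
      exact hasZeroBAux_congr k ((k+1)/10) ((k+1)/10) (by omega) (le_refl _)

-- digit characters of nonzero residues are not '0'
theorem digitChar_ne_zero {r : Nat} (h1 : r ≠ 0) (h2 : r < 10) : Nat.digitChar r ≠ '0' := by
  have h3 : 1 ≤ r := by omega
  interval_cases r <;> decide

-- A's loop in closed form
theorem solLoopA_false (l : List Char) : solLoopA l false = l.contains '0' := by
  induction l with
  | nil => simp [solLoopA]
  | cons c rest ih =>
    by_cases h : c = '0' <;> simp [solLoopA, h, ih, eq_comm]

theorem solLoopA_true (l : List Char) :
    solLoopA l true = (l.dropWhile (· == '0')).contains '0' := by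
  induction l with
  | nil => simp [solLoopA]
  | cons c rest ih =>
    by_cases h : c = '0'
    · simp [solLoopA, h, ih]
    · rw [List.dropWhile_cons_of_neg (by simp [h])]
      simp [solLoopA, h, solLoopA_false, eq_comm]

-- a trailing non-'0' character (the sign, after reversal) does not affect the test
theorem drop_contains_append {c : Char} (hc : c ≠ '0') (xs : List Char) :
    ((xs ++ [c]).dropWhile (· == '0')).contains '0' = (xs.dropWhile (· == '0')).contains '0' := by
  induction xs with
  | nil => simp [List.dropWhile, hc, Ne.symm hc]
  | cons x rest ih =>
    by_cases h : x = '0'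
    · subst h
      rw [List.cons_append, List.dropWhile_cons_of_pos (by simp),
        List.dropWhile_cons_of_pos (by simp)]
      exact ih
    · rw [List.cons_append, List.dropWhile_cons_of_neg (by simp [h]),
        List.dropWhile_cons_of_neg (by simp [h])]
      simp [Ne.symm hc]

-- the plain digit scan: '0' occurs among the decimal digits of k > 0 iff B's second loop says so
theorem contains_toDigits (k : Nat) (hk : 0 < k) :
    (Nat.toDigits 10 k).contains '0' = hasZeroN k := by
  induction k using Nat.strong_induction_on with
  | _ k ih =>
    by_cases hb : k < 10
    · have hm : k % 10 = k := Nat.mod_eq_of_lt hb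
      have hd0 : k / 10 = 0 := Nat.div_eq_of_lt hb
      have hne := digitChar_ne_zero hk.ne' hb
      rw [Nat.toDigits_of_lt_base hb, hasZeroN_eq, if_pos hk.ne', if_neg (by omega), hd0]
      simp [Ne.symm hne, hasZeroN, hasZeroBAux]
    · rw [Nat.not_lt] at hb
      rw [Nat.toDigits_of_base_le (by norm_num) hb]
      have hq : 0 < k / 10 := Nat.div_pos hb (by norm_num)
      have hqlt : k / 10 < k := Nat.div_lt_self hk (by norm_num)
      by_cases hm : k % 10 = 0
      · rw [hasZeroN_eq, if_pos hk.ne', if_pos hm, hm]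
        simp
        exact Or.inr (by decide)
      · have hne := digitChar_ne_zero hm (Nat.mod_lt _ (by norm_num))
        rw [hasZeroN_eq, if_pos hk.ne', if_neg hm, ← ih (k / 10) hqlt hq]
        simp [Ne.symm hne]

-- main lemma: A's stripped-reversed-digits test equals B's two arithmetic loops
theorem main_lemma (m : Nat) :
    ((Nat.toDigits 10 m).reverse.dropWhile (· == '0')).contains '0' = hasZeroN (stripN m) := by
  induction m using Nat.strong_induction_on with
  | _ m ih =>
    by_cases h0 : m = 0
    · subst h0
      decide
    · by_cases hb : m < 10
      · have hm : m % 10 = m := Nat.mod_eq_of_lt hb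
        have hne := digitChar_ne_zero h0 hb
        have hd0 : m / 10 = 0 := Nat.div_eq_of_lt hb
        rw [Nat.toDigits_of_lt_base hb, stripN_eq, if_neg (by omega), hasZeroN_eq,
          if_pos h0, if_neg (by omega), hd0, List.reverse_singleton,
          List.dropWhile_cons_of_neg (by simp [hne])]
        simp [Ne.symm hne, hasZeroN, hasZeroBAux]
      · rw [Nat.not_lt] at hb
        have hq : 0 < m / 10 := Nat.div_pos hb (by norm_num)
        have hqlt : m / 10 < m := Nat.div_lt_self (by omega) (by norm_num)
        rw [Nat.toDigits_of_base_le (by norm_num) hb]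
        by_cases hm : m % 10 = 0
        · -- trailing zero: both sides drop it
          rw [stripN_eq, if_pos ⟨h0, hm⟩]
          have : (Nat.toDigits 10 (m / 10) ++ [(m % 10).digitChar]).reverse
              = (m % 10).digitChar :: (Nat.toDigits 10 (m / 10)).reverse := by simp
          rw [this, hm]
          rw [List.dropWhile_cons_of_pos (by decide)]
          exact ih (m / 10) hqlt
        · -- last digit nonzero: A keeps scanning plainly, B strips nothing
          have hne := digitChar_ne_zero hm (Nat.mod_lt _ (by norm_num))
          rw [stripN_eq, if_neg (by simp [hm]), hasZeroN_eq, if_pos h0, if_neg hm]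
          have : (Nat.toDigits 10 (m / 10) ++ [(m % 10).digitChar]).reverse
              = (m % 10).digitChar :: (Nat.toDigits 10 (m / 10)).reverse := by simp
          rw [this, List.dropWhile_cons_of_neg (by simp [hne])]
          rw [← contains_toDigits (m / 10) hq]
          simp [Ne.symm hne]

-- ===== VERDICT (by name: the statement is the Claim_ definition above) =====
theorem solution_spec : Claim_equal_solution := by
  intro number _
  unfold Spec_solution solution solution_alt
  rw [solLoopA_true]
  show _ = hasZeroN (stripN number.natAbs)
  unfold PySem.Int.toChars
  by_cases hneg : number < 0
  · rw [if_pos hneg]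
    have : ('-' :: Nat.toDigits 10 number.natAbs).reverse
        = (Nat.toDigits 10 number.natAbs).reverse ++ ['-'] := by simp
    rw [this, drop_contains_append (by decide), main_lemma]
  · rw [if_neg hneg]
    have : number.toNat = number.natAbs := by omega
    rw [this, main_lemma]
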